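-- pv_equiv track=rewrite | github.com/cdijkstra/AdventOfCode2024 | Day17/ChronospatialComputer/main.py | find_test
-- ===== SOURCE A (Python) =====
-- def find_test(program, ans):
--     if program == []:
--         return ans * 8
--     for t in range(8):
--         a = ans << 3 | t  # This is where the magic happens
--         if a % 8 == program[-1]:
--             sub = find_test(program[:-1], a)
--             if sub is None:
--                 continue
--             return sub
-- ===== SOURCE B (Python) =====
-- def find_test(program, ans):
--     # Deterministic base-8 build: A's loop can only succeed for t == program[-1],
--     # so the "search" is a single right-to-left pass.
--     acc = ans
--     for p in reversed(program):
--         if p < 0 or p > 7: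
--             return None
--         acc = acc * 8 + p
--     return acc * 8
-- ===== Notes on version B (the rewrite author's own statement) =====
-- stated objective: simpler
-- what changed: Replaced the 8-way recursive backtracking over candidate low octal digits with a single right-to-left iterative pass: since a % 8 always equals t, only t == program[-1] can ever match, so B just folds acc = acc*8 + p over reversed(program) (returning None on a digit outside 0..7) and returns acc*8; no recursion, no list slicing, no trial loop.
import Mathlib
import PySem

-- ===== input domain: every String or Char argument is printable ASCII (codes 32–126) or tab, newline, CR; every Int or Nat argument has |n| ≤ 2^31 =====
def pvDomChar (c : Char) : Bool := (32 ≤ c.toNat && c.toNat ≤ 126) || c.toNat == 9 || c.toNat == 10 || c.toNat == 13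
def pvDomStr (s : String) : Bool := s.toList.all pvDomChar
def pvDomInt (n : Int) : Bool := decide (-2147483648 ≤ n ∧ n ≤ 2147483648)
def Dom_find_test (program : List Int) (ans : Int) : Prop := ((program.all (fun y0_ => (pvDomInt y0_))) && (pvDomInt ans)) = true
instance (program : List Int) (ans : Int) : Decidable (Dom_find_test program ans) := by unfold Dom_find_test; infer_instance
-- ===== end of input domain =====

-- B replaces A's 8-way recursive backtracking with one right-to-left pass building the
-- answer in base 8 (only t == program[-1] can ever match A's a % 8 == program[-1] test);
-- objective: simpler.

-- ===== PORT A =====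
-- A's recursion on program[:-1] together with its inner 'for t in range(8)' loop;
-- the loop is the helper find_test_loop (the 'h : program ≠ []' argument only carries
-- the fact that program[-1] / program[:-1] are reached under the nonempty guard,
-- for termination; it does not alter the computation).
mutual
def find_test (program : List Int) (ans : Int) : Option Int :=
  if h : program = [] then some (ans * 8)
  else find_test_loop program ans (PySem.List.pyRange 0 8 1) h
termination_by (program.length, 9)

def find_test_loop (program : List Int) (ans : Int) (ts : List Int) (h : program ≠ []) : Option Int :=
  match ts with
  | [] => none                                   -- for-loop ends without return: Python returns None
  | t :: rest =>
    let a := PySem.Int.bor (ans <<< (3 : Nat)) t   -- a = ans << 3 | t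
    if PySem.Int.mod a 8 = PySem.List.pyGetD program (-1) 0 then  -- a % 8 == program[-1] (in range: program ≠ [])
      match find_test (PySem.List.slice program none (some (-1))) a with
      | none => find_test_loop program ans rest h  -- continue
      | some sub => some sub                       -- return sub
    else find_test_loop program ans rest h
termination_by (program.length, ts.length)
decreasing_by
  · have hp : 0 < program.length := List.length_pos_iff.mpr h
    simp only [PySem.List.slice_to_neg_one, List.length_dropLast]
    exact Prod.Lex.left _ _ (by omega)
  · exact Prod.Lex.right _ (by simp)
  · exact Prod.Lex.right _ (by simp)
end

-- ===== PORT B =====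
-- B's loop 'for p in reversed(program)' with accumulator acc, as structural recursion
-- over program.reverse.
def find_test_alt_go (acc : Int) : List Int → Option Int
  | [] => some (acc * 8)
  | p :: rest => if p < 0 ∨ p > 7 then none else find_test_alt_go (acc * 8 + p) rest

def find_test_alt (program : List Int) (ans : Int) : Option Int :=
  find_test_alt_go ans program.reverse

-- ===== PRECONDITION & SPEC =====
def Spec_find_test (program : List Int) (ans : Int) (out : Option Int) : Prop := out = find_test_alt program ans
instance (program : List Int) (ans : Int) (out : Option Int) : Decidable (Spec_find_test program ans out) := by unfold Spec_find_test; infer_instance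

-- ===== CLAIM (what is proved, stated in full; the proofs are below) =====
def Claim_equal_find_test : Prop := ∀ (program : List Int) (ans : Int), Dom_find_test program ans → Spec_find_test program ans (find_test program ans)

-- ===== LEMMAS AND PROOFS =====

-- Nat bit facts feeding the characterisation of A's 'ans << 3 | t'.
theorem pv_lorN (m t : Nat) (h : t < 8) : (8*m) ||| t = 8*m + t := by
  apply Nat.eq_of_testBit_eq
  intro i
  have h8 : 8*m = 2^3 * m := by ring
  rw [h8, Nat.testBit_lor, Nat.testBit_two_pow_mul_add m (by simpa using h) i]
  have hm : (2^3 * m).testBit i = if i < 3 then false else m.testBit (i-3) := by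
    rw [show (2^3*m : Nat) = 2^3*m+0 by ring, Nat.testBit_two_pow_mul_add m (by norm_num) i]
    simp
  by_cases hi : i < 3
  · rw [hm]; simp [hi]
  · have h2 : (8:Nat) ≤ 2^i := by
      calc (8:Nat) = 2^3 := by norm_num
      _ ≤ 2^i := Nat.pow_le_pow_right (by norm_num) (by omega)
    have ht : t.testBit i = false := Nat.testBit_lt_two_pow (by omega)
    rw [hm]; simp [hi, ht]

theorem pv_landN (k t : Nat) (h : t < 8) : (8*k+7) &&& t = t := by
  apply Nat.eq_of_testBit_eq
  intro i
  rw [Nat.testBit_land, show (8*k+7 : Nat) = 2^3*k+7 by ring, Nat.testBit_two_pow_mul_add k (by norm_num) i]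
  by_cases hi : i < 3
  · have : (7:Nat).testBit i = true := by interval_cases i <;> decide
    simp [hi, this]
  · have h2 : (8:Nat) ≤ 2^i := by
      calc (8:Nat) = 2^3 := by norm_num
      _ ≤ 2^i := Nat.pow_le_pow_right (by norm_num) (by omega)
    have ht : t.testBit i = false := Nat.testBit_lt_two_pow (by omega)
    simp [ht]

-- ans << 3 | t  =  8*ans + t  for 0 ≤ t < 8 (any sign of ans, Python two's complement).
theorem pv_bor_shift (a t : Int) (h0 : 0 ≤ t) (h1 : t < 8) :
    PySem.Int.bor (a <<< (3:Nat)) t = 8*a + t := by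
  have hs : a <<< (3:Nat) = 8 * a := by
    rw [Int.shiftLeft_eq]; ring
  rw [hs]
  unfold PySem.Int.bor
  by_cases ha : 0 ≤ a
  · rw [if_pos (by positivity), if_pos h0]
    have h8 : (8*a).toNat = 8 * a.toNat := by omega
    rw [h8, pv_lorN _ _ (by omega)]
    omega
  · rw [if_neg (by omega), if_pos h0]
    have hk : (-(8*a) - 1).toNat = 8 * (-a-1).toNat + 7 := by omega
    rw [hk, pv_landN _ _ (by omega)]
    omega

-- Characterisation of A's inner for-loop: with program = ys ++ [x] and candidate list ts
-- of in-range, distinct digits, the only candidate that can pass the a % 8 test is x itself.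
theorem pv_loop_eq (ys : List Int) (x ans : Int) (ts : List Int)
    (hts : ∀ t ∈ ts, 0 ≤ t ∧ t < 8) (hnd : ts.Nodup) (h : ys ++ [x] ≠ []) :
    find_test_loop (ys ++ [x]) ans ts h =
      if x ∈ ts then find_test ys (8 * ans + x) else none := by
  induction ts with
  | nil => simp [find_test_loop]
  | cons t rest ih =>
    rw [find_test_loop]
    have hb : PySem.Int.bor (ans <<< (3:Nat)) t = 8*ans + t :=
      pv_bor_shift ans t (hts t (by simp)).1 (hts t (by simp)).2
    have ht8 : 0 ≤ t ∧ t < 8 := hts t (by simp)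
    have hm : PySem.Int.mod (8*ans+t) 8 = t := by
      rw [PySem.Int.mod_eq_emod_of_pos (by norm_num)]; omega
    have hg : PySem.List.pyGetD (ys++[x]) (-1) 0 = x :=
      PySem.List.pyGetD_neg_one_append_singleton ys x 0
    have hsl : PySem.List.slice (ys++[x]) none (some (-1)) = ys := by
      rw [PySem.List.slice_to_neg_one]; simp
    simp only [hb, hm, hg, hsl]
    by_cases hx : t = x
    · subst hx
      rw [if_pos rfl, if_pos (by simp)]
      cases hft : find_test ys (8*ans + t) with
      | none =>
        rw [ih (fun u hu => hts u (by simp [hu])) (List.nodup_cons.mp hnd).2]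
        rw [if_neg (List.nodup_cons.mp hnd).1]
      | some v => rfl
    · rw [if_neg hx, ih (fun u hu => hts u (by simp [hu])) (List.nodup_cons.mp hnd).2]
      by_cases hxr : x ∈ rest
      · rw [if_pos hxr, if_pos (by simp [hxr])]
      · rw [if_neg hxr, if_neg (by simp [hxr]; exact Ne.symm hx)]

-- Main equivalence: A equals B's right-to-left base-8 build, for every input.
theorem pv_main (program : List Int) (ans : Int) :
    find_test program ans = find_test_alt_go ans program.reverse := by
  induction program using List.reverseRecOn generalizing ans with
  | nil => simp [find_test, find_test_alt_go]
  | append_singleton ys x ih =>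
    have hne : ys ++ [x] ≠ [] := by simp
    rw [find_test, dif_neg hne]
    rw [pv_loop_eq ys x ans (PySem.List.pyRange 0 8 1)
      (fun t ht => by
        have := PySem.List.mem_pyRange_one.mp ht
        omega)
      (PySem.List.nodup_pyRange_one 0 8) hne]
    rw [List.reverse_append, List.reverse_singleton, List.singleton_append, find_test_alt_go]
    by_cases hx : 0 ≤ x ∧ x < 8
    · rw [if_pos (PySem.List.mem_pyRange_one.mpr (by omega)), if_neg (by omega), ih]
      ring_nf
    · rw [if_neg (fun hmem => hx (by simpa using PySem.List.mem_pyRange_one.mp hmem)),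
        if_pos (by omega)]

-- ===== VERDICT (by name: the statement is the Claim_ definition above) =====
theorem find_test_spec : Claim_equal_find_test := by
  intro program ans _
  unfold Spec_find_test find_test_alt
  exact pv_main program ans
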